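-- pv_equiv track=rewrite | github.com/zearkiatos/python-base | lexicalAnalyzer.py | text_analyzer
-- ===== SOURCE A (Python) =====
-- CHARACTER_NOT_ALLOW = [".", ","]
--
-- def clear_not_allow_text(text:str)->str:
--     if text != '':
--         for character in CHARACTER_NOT_ALLOW:
--             text = text.replace(character, '')
--     return text
--
-- def text_analyzer (text:str, allow_characters:list)->dict:
--     text = clear_not_allow_text(text)
--     if (text!=''):
--         textArray = text.split(" ")
--     else:
--         textArray = ['']
--
--     text_analyzed = []
--
--     for word in textArray:
--         for character in allow_characters:
--             if character in list(word) and not word in text_analyzed: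
--                 text_analyzed.append(word)
--                 break
--
--     return sort(text_analyzed)
--
-- def sort(array:list, ascending:bool = True)->list:
--     temp = ''
--     for i in range(0, len(array)):
--         for j in range(i, len(array)):
--             if (ascending):
--                 if (array[i] > array[j]):
--                     temp = array[i]
--                     array[i] = array[j]
--                     array[j] = temp
--             else:
--                 if (array[i] < array[j]):
--                     temp = array[i]
--                     array[i] = array[j]
--                     array[j] = temp
--
--     return array
-- ===== SOURCE B (Python) =====
-- def text_analyzer(text, allow_characters):
--     # strip forbidden chars, split exactly as A (empty text -> [''])
--     cleaned = text.replace(".", "").replace(",", "")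
--     words = cleaned.split(" ") if cleaned != "" else [""]
--     allowed = {c for c in allow_characters if len(c) == 1}
--     # keep duplicates while filtering
--     matched = [w for w in words if any(ch in allowed for ch in w)]
--     matched.sort()
--     # single forward pass removing adjacent duplicates
--     result = []
--     last = None
--     for w in matched:
--         if last is None or w != last:
--             result.append(w)
--             last = w
--     return result
-- ===== Notes on version B (the rewrite author's own statement) =====
-- stated objective: faster
-- what changed: A dedups during filtering with a linear membership scan and sorts with a hand-written quadratic compare-and-swap loop; B filters keeping duplicates, does one library sort, and removes duplicates in a single adjacent-equality pass over the sorted list.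
import Mathlib
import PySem

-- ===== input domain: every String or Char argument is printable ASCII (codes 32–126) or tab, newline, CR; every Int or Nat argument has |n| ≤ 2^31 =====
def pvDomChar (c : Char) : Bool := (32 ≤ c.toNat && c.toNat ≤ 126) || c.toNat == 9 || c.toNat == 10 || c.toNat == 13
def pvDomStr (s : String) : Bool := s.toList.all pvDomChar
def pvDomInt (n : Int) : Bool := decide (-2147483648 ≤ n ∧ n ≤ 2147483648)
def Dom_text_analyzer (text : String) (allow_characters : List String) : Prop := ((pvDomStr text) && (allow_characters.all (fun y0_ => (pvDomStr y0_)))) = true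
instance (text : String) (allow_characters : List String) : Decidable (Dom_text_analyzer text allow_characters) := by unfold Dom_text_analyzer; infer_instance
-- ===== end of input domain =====

-- B replaces A's dedup-during-filter + hand-written quadratic sort by: filter keeping
-- duplicates, one library sort, then a single adjacent-duplicate-removal pass.


-- ===== PORT A =====
def pyCHARACTER_NOT_ALLOW : List String := [".", ","]

def clear_not_allow_text (text : String) : String :=
  if text ≠ "" then
    pyCHARACTER_NOT_ALLOW.foldl (fun t c => PySem.Str.replace t c "") text
  else text

-- inner 'for character in allow_characters: … break' loop of A
def pyInnerA (word : String) (acc : List String) : List String → List String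
  | [] => acc
  | c :: rest =>
    if (word.toList.map (fun ch => String.ofList [ch])).contains c && !(acc.contains word) then
      acc ++ [word]
    else pyInnerA word acc rest

-- one comparison/swap of A's hand-written sort ('array[i] > array[j]' is 'a[j] < a[i]')
def pySwapStep (ascending : Bool) (i : Int) (a : List String) (j : Int) : List String :=
  if ascending then
    if PySem.List.pyGetD a j "" < PySem.List.pyGetD a i "" then
      let temp := PySem.List.pyGetD a i ""
      (a.set i.toNat (PySem.List.pyGetD a j "")).set j.toNat temp
    else a
  else
    if PySem.List.pyGetD a i "" < PySem.List.pyGetD a j "" then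
      let temp := PySem.List.pyGetD a i ""
      (a.set i.toNat (PySem.List.pyGetD a j "")).set j.toNat temp
    else a

-- A's helper 'sort' (default ascending := True)
def pySortA (array : List String) (ascending : Bool) : List String :=
  (PySem.List.pyRange 0 (array.length : Int) 1).foldl
    (fun a i => (PySem.List.pyRange i (a.length : Int) 1).foldl (pySwapStep ascending i) a) array

def text_analyzer (text : String) (allow_characters : List String) : List String :=
  let t := clear_not_allow_text text
  let textArray := if t ≠ "" then (PySem.Str.split? t " ").getD [] else [""]
  let text_analyzed := textArray.foldl (fun acc word => pyInnerA word acc allow_characters) []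
  pySortA text_analyzed true

-- ===== PORT B =====
-- the body of B's adjacent-dedup loop over (result, last)
def dedupStep (st : List String × Option String) (w : String) : List String × Option String :=
  match st.2 with
  | none => (st.1 ++ [w], some w)
  | some l => if w ≠ l then (st.1 ++ [w], some w) else st

def text_analyzer_alt (text : String) (allow_characters : List String) : List String :=
  let cleaned := PySem.Str.replace (PySem.Str.replace text "." "") "," ""
  let words := if cleaned ≠ "" then (PySem.Str.split? cleaned " ").getD [] else [""]
  let allowed := PySem.Set.ofList (allow_characters.filter (fun c => PySem.Str.len c == 1))
  let matched := words.filter (fun w => w.toList.any (fun ch => allowed.contains (String.ofList [ch])))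
  let sortedM := PySem.List.sorted matched (fun x => x) false
  (sortedM.foldl dedupStep ([], none)).1

-- ===== PRECONDITION & SPEC =====
def Spec_text_analyzer (text : String) (allow_characters : List String) (out : List String) : Prop := out = text_analyzer_alt text allow_characters
instance (text : String) (allow_characters : List String) (out : List String) : Decidable (Spec_text_analyzer text allow_characters out) := by unfold Spec_text_analyzer; infer_instance

-- ===== CLAIM (what is proved, stated in full; the proofs are below) =====
def Claim_equal_text_analyzer : Prop := ∀ (text : String) (allow_characters : List String), Dom_text_analyzer text allow_characters → Spec_text_analyzer text allow_characters (text_analyzer text allow_characters)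

-- ===== LEMMAS AND PROOFS =====

-- generic loop-invariant principle for a foldl over range(a, b)
theorem foldl_pyRange_inv {α : Type} (f : α → Int → α) (Inv : Int → α → Prop)
    (a b : Int) (hab : a ≤ b) (init : α) (hinit : Inv a init)
    (hstep : ∀ j x, a ≤ j → j < b → Inv j x → Inv (j + 1) (f x j)) :
    Inv b ((PySem.List.pyRange a b 1).foldl f init) := by
  obtain ⟨m, hm⟩ : ∃ m : Nat, (b - a).toNat = m := ⟨_, rfl⟩
  induction m generalizing a init with
  | zero =>
    have hba : b ≤ a := by omega
    have : b = a := le_antisymm hba hab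
    rw [PySem.List.pyRange_one_eq_nil hba]; simpa [this] using hinit
  | succ m ih =>
    have hab' : a < b := by omega
    rw [PySem.List.pyRange_one_cons hab']
    simp only [List.foldl_cons]
    exact ih (a + 1) (by omega) (f init a) (hstep a init le_rfl hab' hinit)
      (fun j x hj hjb hI => hstep j x (by omega) hjb hI) (by omega)

-- the word qualifies: some allowed character occurs in it
def qualA (allow : List String) (w : String) : Bool :=
  allow.any (fun c => (w.toList.map (fun ch => String.ofList [ch])).contains c)

theorem pyInnerA_eq (w : String) (acc : List String) (allow : List String) :
    pyInnerA w acc allow =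
      if qualA allow w && !(acc.contains w) then acc ++ [w] else acc := by
  induction allow with
  | nil => simp [pyInnerA, qualA]
  | cons c rest ih =>
    by_cases hc : (∃ a ∈ w.toList, String.ofList [a] = c)
    · by_cases hm : w ∈ acc
      · simp [pyInnerA, qualA, hc, hm, ih]
      · simp [pyInnerA, qualA, hc, hm]
    · simp [pyInnerA, qualA, hc, ih]

def stepA (allow : List String) (acc : List String) (w : String) : List String :=
  if qualA allow w && !acc.contains w then acc ++ [w] else acc

theorem foldl_innerA_eq (allow ws acc : List String) :
    ws.foldl (fun acc word => pyInnerA word acc allow) acc = ws.foldl (stepA allow) acc := by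
  induction ws generalizing acc with
  | nil => rfl
  | cons w ws ih => rw [List.foldl_cons, List.foldl_cons, pyInnerA_eq, ← stepA, ih]

theorem mem_foldl_stepA (allow ws acc : List String) (x : String) :
    x ∈ ws.foldl (stepA allow) acc ↔ x ∈ acc ∨ (x ∈ ws ∧ qualA allow x = true) := by
  induction ws generalizing acc with
  | nil => simp
  | cons w ws ih =>
    rw [List.foldl_cons, ih]
    by_cases h : (qualA allow w && !acc.contains w) = true
    · rw [stepA, if_pos h]
      simp only [Bool.and_eq_true, Bool.not_eq_true', List.contains_eq_mem, decide_eq_false_iff_not] at h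
      simp only [List.mem_append, List.mem_cons]
      constructor
      · rintro ((hx | (rfl | hx)) | hx)
        · exact Or.inl hx
        · exact Or.inr ⟨Or.inl rfl, h.1⟩
        · simp at hx
        · exact Or.inr ⟨Or.inr hx.1, hx.2⟩
      · rintro (hx | ⟨(rfl | hx), hq⟩)
        · exact Or.inl (Or.inl hx)
        · exact Or.inl (Or.inr (Or.inl rfl))
        · exact Or.inr ⟨hx, hq⟩
    · rw [stepA, if_neg h]
      simp only [Bool.and_eq_true, Bool.not_eq_true', List.contains_eq_mem, decide_eq_false_iff_not,
        not_and, not_not] at h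
      simp only [List.mem_cons]
      constructor
      · rintro (hx | hx)
        · exact Or.inl hx
        · exact Or.inr ⟨Or.inr hx.1, hx.2⟩
      · rintro (hx | ⟨(rfl | hx), hq⟩)
        · exact Or.inl hx
        · exact Or.inl (h hq)
        · exact Or.inr ⟨hx, hq⟩

theorem nodup_foldl_stepA (allow ws acc : List String) (h : acc.Nodup) :
    (ws.foldl (stepA allow) acc).Nodup := by
  induction ws generalizing acc with
  | nil => simpa
  | cons w ws ih =>
    rw [List.foldl_cons]
    apply ih
    by_cases hc : (qualA allow w && !acc.contains w) = true
    · rw [stepA, if_pos hc]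
      simp only [Bool.and_eq_true, Bool.not_eq_true', List.contains_eq_mem, decide_eq_false_iff_not] at hc
      exact List.Nodup.append h (List.nodup_singleton w) (by
        intro a ha hb
        simp only [List.mem_singleton] at hb
        subst hb
        exact hc.2 ha)
    · rw [stepA, if_neg hc]; exact h

theorem getD_set_self {α : Type} (l : List α) (n : Nat) (x d : α) (h : n < l.length) :
    (l.set n x).getD n d = x := by
  simp [List.getD_eq_getElem?_getD, List.getElem?_set_self h]

theorem getD_set_ne {α : Type} (l : List α) (n m : Nat) (x d : α) (h : n ≠ m) :
    (l.set n x).getD m d = l.getD m d := by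
  simp [List.getD_eq_getElem?_getD, List.getElem?_set_ne h]

theorem take_set_of_le {α : Type} (l : List α) (n m : Nat) (x : α) (h : m ≤ n) :
    (l.set n x).take m = l.take m := by
  rw [List.take_set]
  apply List.set_eq_of_length_le
  simpa using by omega

theorem swap_cons_perm {α : Type} (d x : α) : ∀ (t : List α) (j : Nat), j < t.length →
    (t.getD j d :: t.set j x).Perm (x :: t)
  | [], j, h => by simp at h
  | y :: t, 0, _ => by simpa using List.Perm.swap x y t
  | y :: t, j+1, h => by
    simp only [List.getD_cons_succ, List.set_cons_succ]
    exact ((List.Perm.swap y (t.getD j d) (t.set j x)).trans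
      ((swap_cons_perm d x t j (Nat.lt_of_succ_lt_succ h)).cons y)).trans
      (List.Perm.swap x y t)

theorem swap_perm {α : Type} (d : α) : ∀ (a : List α) (i j : Nat), i < a.length → j < a.length →
    ((a.set i (a.getD j d)).set j (a.getD i d)).Perm a
  | [], _, _, hi, _ => by simp at hi
  | x :: t, 0, 0, _, _ => by simp
  | x :: t, 0, j+1, _, hj => by
    simp only [List.getD_cons_succ, List.getD_cons_zero, List.set_cons_zero, List.set_cons_succ]
    exact swap_cons_perm d x t j (Nat.lt_of_succ_lt_succ hj)
  | x :: t, i+1, 0, hi, _ => by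
    simp only [List.getD_cons_succ, List.getD_cons_zero, List.set_cons_zero, List.set_cons_succ]
    exact swap_cons_perm d x t i (Nat.lt_of_succ_lt_succ hi)
  | x :: t, i+1, j+1, hi, hj => by
    simp only [List.getD_cons_succ, List.set_cons_succ]
    exact (swap_perm d t i j (Nat.lt_of_succ_lt_succ hi) (Nat.lt_of_succ_lt_succ hj)).cons x

theorem drop_perm_of_perm_take_eq {α : Type} {a b : List α} (m : Nat)
    (hp : b.Perm a) (ht : b.take m = a.take m) : (b.drop m).Perm (a.drop m) := by
  have h : (b.take m ++ b.drop m).Perm (a.take m ++ a.drop m) := by simpa using hp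
  rw [ht] at h
  exact (List.perm_append_left_iff _).mp h

theorem getD_eq_of_take_eq {α : Type} {a b : List α} {m p : Nat} (d : α)
    (ht : b.take m = a.take m) (hp : p < m) : b.getD p d = a.getD p d := by
  have h1 : (List.take m b)[p]? = b[p]? := by rw [List.getElem?_take]; simp [hp]
  have h2 : (List.take m a)[p]? = a[p]? := by rw [List.getElem?_take]; simp [hp]
  rw [List.getD_eq_getElem?_getD, List.getD_eq_getElem?_getD, ← h1, ← h2, ht]

theorem getD_mem_drop {α : Type} (r : List α) (d : α) (m k : Nat) (hm : m ≤ k) (hk : k < r.length) :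
    r.getD k d ∈ r.drop m := by
  rw [List.getD_eq_getElem r d hk]
  have h : r[k] = (List.drop m r)[k - m]'(by simp; omega) := by
    rw [List.getElem_drop]
    congr 1
    omega
  rw [h]
  exact List.getElem_mem _

theorem exists_getD_of_mem_drop {α : Type} (a : List α) (d : α) (m : Nat) (x : α)
    (hx : x ∈ a.drop m) : ∃ k, m ≤ k ∧ k < a.length ∧ a.getD k d = x := by
  obtain ⟨n, hn, hxe⟩ := List.mem_iff_getElem.mp hx
  refine ⟨m + n, by omega, by simp at hn; omega, ?_⟩
  rw [List.getD_eq_getElem a d (by simp at hn; omega)]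
  rw [← List.getElem_drop]
  exact hxe

theorem inner_loop (a : List String) (i : Int) (hi0 : 0 ≤ i) (hiN : i < (a.length : Int)) :
    ∀ r, r = (PySem.List.pyRange i (a.length : Int) 1).foldl (pySwapStep true i) a →
    r.length = a.length ∧ r.Perm a ∧ r.take i.toNat = a.take i.toNat ∧
      ∀ k : Nat, i ≤ (k : Int) → k < a.length → r.getD i.toNat "" ≤ r.getD k "" := by
  intro r hr
  have main := foldl_pyRange_inv (pySwapStep true i)
    (fun j b => b.length = a.length ∧ b.Perm a ∧ b.take i.toNat = a.take i.toNat ∧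
      ∀ k : Nat, i ≤ (k : Int) → (k : Int) < j → b.getD i.toNat "" ≤ b.getD k "")
    i (a.length : Int) (le_of_lt hiN) a
    ⟨rfl, List.Perm.refl a, rfl, fun k hk1 hk2 => absurd (lt_of_le_of_lt hk1 hk2) (lt_irrefl _)⟩
    ?step
  · rw [← hr] at main
    obtain ⟨h1, h2, h3, h4⟩ := main
    exact ⟨h1, h2, h3, fun k hk1 hk2 => h4 k hk1 (by omega)⟩
  · intro j b hij hjN ⟨hlen, hperm, htake, hmin⟩
    have hj0 : 0 ≤ j := le_trans hi0 hij
    have hiN' : i.toNat < b.length := by omega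
    have hjN' : j.toNat < b.length := by omega
    rw [pySwapStep, if_pos rfl, PySem.List.pyGetD_of_nonneg b _ hj0, PySem.List.pyGetD_of_nonneg b _ hi0]
    by_cases hc : b.getD j.toNat "" < b.getD i.toNat ""
    · rw [if_pos hc]
      have hne : i.toNat ≠ j.toNat := by
        intro h
        rw [h] at hc
        exact lt_irrefl _ hc
      refine ⟨by simp [hlen], ((swap_perm "" b i.toNat j.toNat hiN' hjN').trans hperm), ?_, ?_⟩
      · rw [take_set_of_le _ _ _ _ (by omega), take_set_of_le _ _ _ _ le_rfl, htake]
      · have hgi : ((b.set i.toNat (b.getD j.toNat "")).set j.toNat (b.getD i.toNat "")).getD i.toNat ""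
            = b.getD j.toNat "" := by
          rw [getD_set_ne _ _ _ _ _ (Ne.symm hne), getD_set_self _ _ _ _ hiN']
        intro k hk1 hk2
        rw [hgi]
        by_cases hkj : k = j.toNat
        · subst hkj
          rw [getD_set_self _ _ _ _ (by simpa using hjN')]
          exact le_of_lt hc
        · by_cases hki : k = i.toNat
          · subst hki
            rw [hgi]
          · rw [getD_set_ne _ _ _ _ _ (Ne.symm hkj), getD_set_ne _ _ _ _ _ (Ne.symm hki)]
            exact le_trans (le_of_lt hc) (hmin k hk1 (by omega))
    · rw [if_neg hc]
      refine ⟨hlen, hperm, htake, ?_⟩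
      intro k hk1 hk2
      by_cases hkj : (k : Int) = j
      · have : k = j.toNat := by omega
        subst this
        exact not_lt.mp hc
      · exact hmin k hk1 (by omega)

theorem pySortA_props (a0 : List String) :
    (pySortA a0 true).Perm a0 ∧ (pySortA a0 true).Pairwise (· ≤ ·) := by
  have main := foldl_pyRange_inv
    (fun a i => (PySem.List.pyRange i (a.length : Int) 1).foldl (pySwapStep true i) a)
    (fun i a => a.length = a0.length ∧ a.Perm a0 ∧
      ∀ p k : Nat, (p : Int) < i → p < k → k < a.length → a.getD p "" ≤ a.getD k "")
    0 (a0.length : Int) (by positivity) a0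
    ⟨rfl, List.Perm.refl a0, fun p k hp _ _ => absurd hp (by omega)⟩
    ?step
  · obtain ⟨hlen, hperm, hcross⟩ := main
    refine ⟨hperm, ?_⟩
    rw [List.pairwise_iff_getElem]
    intro p q hp hq hpq
    have hlen' : (pySortA a0 true).length = a0.length := hlen
    rw [← List.getD_eq_getElem _ "" hp, ← List.getD_eq_getElem _ "" hq]
    exact hcross p q (by omega) hpq (by omega)
  · intro i a hi0 hiN ⟨hlen, hperm, hcross⟩
    beta_reduce
    set r := (PySem.List.pyRange i (a.length : Int) 1).foldl (pySwapStep true i) a with hrdef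
    obtain ⟨rlen, rperm, rtake, rmin⟩ := inner_loop a i hi0 (by omega) r hrdef
    refine ⟨by omega, rperm.trans hperm, ?_⟩
    intro p k hp1 hp2 hp3
    by_cases hpi : (p : Int) < i
    · have hpa : r.getD p "" = a.getD p "" := getD_eq_of_take_eq "" rtake (by omega)
      by_cases hki : (k : Int) < i
      · rw [hpa, getD_eq_of_take_eq "" rtake (by omega)]
        exact hcross p k hpi hp2 (by omega)
      · have hmem : r.getD k "" ∈ r.drop i.toNat := getD_mem_drop r "" i.toNat k (by omega) (by omega)
        have hdp : (r.drop i.toNat).Perm (a.drop i.toNat) := drop_perm_of_perm_take_eq i.toNat rperm rtake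
        obtain ⟨k', hk'1, hk'2, hk'3⟩ := exists_getD_of_mem_drop a "" i.toNat _ (hdp.mem_iff.mp hmem)
        rw [hpa, ← hk'3]
        exact hcross p k' hpi (by omega) hk'2
    · have hpieq : p = i.toNat := by omega
      subst hpieq
      exact rmin k (by omega) (by omega)

-- B's adjacent-dedup pass, recursively
def dedupGo (last : Option String) : List String → List String
  | [] => []
  | w :: ws =>
    match last with
    | none => w :: dedupGo (some w) ws
    | some l => if w ≠ l then w :: dedupGo (some w) ws else dedupGo (some l) ws

theorem dedupStep_none (acc : List String) (w : String) :
    dedupStep (acc, none) w = (acc ++ [w], some w) := rfl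

theorem dedupStep_some_ne (acc : List String) (l w : String) (h : w ≠ l) :
    dedupStep (acc, some l) w = (acc ++ [w], some w) := by simp [dedupStep, h]

theorem dedupStep_some_eq (acc : List String) (w : String) :
    dedupStep (acc, some w) w = (acc, some w) := by simp [dedupStep]

theorem foldl_dedup_eq (ws : List String) (acc : List String) (last : Option String) :
    (ws.foldl dedupStep (acc, last)).1 = acc ++ dedupGo last ws := by
  induction ws generalizing acc last with
  | nil => simp [dedupGo]
  | cons w ws ih =>
    rw [List.foldl_cons]
    cases last with
    | none => rw [dedupStep_none, ih]; simp [dedupGo]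
    | some l =>
      by_cases hw : w = l
      · subst hw
        rw [dedupStep_some_eq, ih]
        simp [dedupGo]
      · rw [dedupStep_some_ne _ _ _ hw, ih]
        simp [dedupGo, hw]

theorem dedupGo_spec (ws : List String) (last : Option String)
    (hs : ws.Pairwise (· ≤ ·))
    (hl : ∀ l, last = some l → ∀ w ∈ ws, l ≤ w) :
    (dedupGo last ws).Pairwise (· < ·) ∧
      (∀ x, x ∈ dedupGo last ws ↔ x ∈ ws ∧ last ≠ some x) := by
  induction ws generalizing last with
  | nil => simp [dedupGo]
  | cons w ws ih =>
    rw [List.pairwise_cons] at hs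
    have hle : ∀ y ∈ ws, w ≤ y := hs.1
    obtain ⟨hp, hm⟩ := ih (some w) hs.2 (by rintro l hl' y hy; cases hl'; exact hle y hy)
    have hpc : (w :: dedupGo (some w) ws).Pairwise (· < ·) := by
      rw [List.pairwise_cons]
      refine ⟨?_, hp⟩
      intro y hy
      obtain ⟨hyw, hne⟩ := (hm y).mp hy
      exact lt_of_le_of_ne (hle y hyw) (by simpa [eq_comm] using hne)
    cases last with
    | none =>
      simp only [dedupGo]
      refine ⟨hpc, ?_⟩
      intro x
      simp only [List.mem_cons, hm]
      constructor
      · rintro (rfl | ⟨hx, _⟩)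
        · simp
        · simp [hx]
      · rintro ⟨(rfl | hx), _⟩
        · exact Or.inl rfl
        · by_cases hxw : x = w
          · exact Or.inl hxw
          · exact Or.inr ⟨hx, by simpa [eq_comm] using hxw⟩
    | some l =>
      by_cases hw : w = l
      · subst hw
        have hgo : dedupGo (some w) (w :: ws) = dedupGo (some w) ws := by simp [dedupGo]
        rw [hgo]
        refine ⟨hp, ?_⟩
        intro x
        rw [hm x]
        simp only [List.mem_cons]
        constructor
        · rintro ⟨hx, hne⟩
          exact ⟨Or.inr hx, hne⟩
        · rintro ⟨(rfl | hx), hne⟩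
          · exact absurd rfl hne
          · exact ⟨hx, hne⟩
      · have hgo : dedupGo (some l) (w :: ws) = w :: dedupGo (some w) ws := by simp [dedupGo, hw]
        rw [hgo]
        refine ⟨hpc, ?_⟩
        intro x
        simp only [List.mem_cons, hm]
        constructor
        · rintro (rfl | ⟨hx, hne⟩)
          · exact ⟨Or.inl rfl, by simpa [eq_comm] using hw⟩
          · refine ⟨Or.inr hx, ?_⟩
            intro hc
            obtain rfl : l = x := by injection hc
            exact hw ((le_antisymm ((hl l rfl) w (List.mem_cons_self)) (hle l hx)).symm)
        · rintro ⟨(rfl | hx), hne⟩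
          · exact Or.inl rfl
          · by_cases hxw : x = w
            · exact Or.inl hxw
            · exact Or.inr ⟨hx, by simpa [eq_comm] using hxw⟩

theorem qual_eq (allow : List String) (w : String) :
    (w.toList.any (fun ch =>
      (PySem.Set.ofList (allow.filter (fun c => PySem.Str.len c == 1))).contains (String.ofList [ch])))
      = qualA allow w := by
  rw [Bool.eq_iff_iff]
  simp only [qualA, List.any_eq_true, PySem.Set.contains_iff, PySem.Set.mem_ofList,
    List.mem_filter, List.contains_eq_mem, List.mem_map, decide_eq_true_eq]
  constructor
  · rintro ⟨ch, hch, hmem, -⟩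
    exact ⟨String.ofList [ch], hmem, ch, hch, rfl⟩
  · rintro ⟨c, hc, ch, hch, rfl⟩
    exact ⟨ch, hch, hc, by simp [PySem.Str.len]⟩

theorem clean_eq (text : String) :
    clear_not_allow_text text = PySem.Str.replace (PySem.Str.replace text "." "") "," "" := by
  by_cases h : text = ""
  · subst h; decide
  · simp [clear_not_allow_text, h, pyCHARACTER_NOT_ALLOW]

-- ===== VERDICT (by name: the statement is the Claim_ definition above) =====
theorem text_analyzer_spec : Claim_equal_text_analyzer := by
  intro text allow _dom
  unfold Spec_text_analyzer
  -- shared word list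
  have hA : text_analyzer text allow =
      pySortA (((if clear_not_allow_text text ≠ "" then (PySem.Str.split? (clear_not_allow_text text) " ").getD [] else [""])).foldl
        (fun acc word => pyInnerA word acc allow) []) true := rfl
  rw [hA, clean_eq]
  set cleaned := PySem.Str.replace (PySem.Str.replace text "." "") "," "" with hcleaned
  set words := (if cleaned ≠ "" then (PySem.Str.split? cleaned " ").getD [] else [""]) with hwords
  -- A's filtered, deduplicated list
  rw [foldl_innerA_eq]
  set L := words.foldl (stepA allow) [] with hL
  have hLnodup : L.Nodup := nodup_foldl_stepA allow words [] (List.nodup_nil)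
  have hLmem : ∀ x, x ∈ L ↔ x ∈ words ∧ qualA allow x = true := by
    intro x
    rw [hL, mem_foldl_stepA]
    simp
  -- A's result
  obtain ⟨haperm, hapw⟩ := pySortA_props L
  have hAnodup : (pySortA L true).Nodup := haperm.nodup_iff.mpr hLnodup
  have hApwlt : (pySortA L true).Pairwise (· < ·) := by
    have := List.Pairwise.and hapw hAnodup
    exact this.imp (fun h => lt_of_le_of_ne h.1 h.2)
  -- B's result
  have hB : text_analyzer_alt text allow =
      ((PySem.List.sorted (words.filter (fun w => w.toList.any (fun ch =>
          (PySem.Set.ofList (allow.filter (fun c => PySem.Str.len c == 1))).contains (String.ofList [ch]))))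
        (fun x => x) false).foldl dedupStep ([], none)).1 := rfl
  have hfilter : words.filter (fun w => w.toList.any (fun ch =>
          (PySem.Set.ofList (allow.filter (fun c => PySem.Str.len c == 1))).contains (String.ofList [ch])))
        = words.filter (qualA allow) := by
    apply List.filter_congr
    intro x _
    exact qual_eq allow x
  rw [hB, hfilter, foldl_dedup_eq]
  set M := PySem.List.sorted (words.filter (qualA allow)) (fun x => x) false with hM
  have hMpw : M.Pairwise (· ≤ ·) := PySem.List.sorted_pairwise _ _
  obtain ⟨hBpwlt, hBmem⟩ := dedupGo_spec M none hMpw (by simp)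
  have hBmem' : ∀ x, x ∈ dedupGo none M ↔ x ∈ words ∧ qualA allow x = true := by
    intro x
    rw [hBmem x]
    have : x ∈ M ↔ x ∈ words.filter (qualA allow) := PySem.List.mem_sorted _ _ _ _
    simp [this, List.mem_filter]
  have hBnodup : (dedupGo none M).Nodup := hBpwlt.imp (fun h => ne_of_lt h)
  -- both strictly sorted with the same members
  have hmemiff : ∀ x, x ∈ pySortA L true ↔ x ∈ [] ++ dedupGo none M := by
    intro x
    rw [haperm.mem_iff, hLmem, List.nil_append, hBmem']
  have hperm : (pySortA L true).Perm ([] ++ dedupGo none M) :=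
    (List.perm_ext_iff_of_nodup hAnodup (by simpa using hBnodup)).mpr hmemiff
  exact hperm.eq_of_pairwise (fun a b _ _ h1 h2 => le_antisymm h1 h2)
    hapw (by simpa using hBpwlt.imp le_of_lt)
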